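-- pv_equiv track=rewrite | github.com/snyke7/aoc2023 | day14.py | cubes_n_rollers_string
-- ===== SOURCE A (Python) =====
-- def cubes_n_rollers_string(cubes, rollers, dish_size):
--     return '\n'.join((
--         ''.join(
--             (
--                 '#' if (i, j) in cubes else (
--                     'O' if (i, j) in rollers else '.'
--                 )
--             )
--             for j in range(dish_size)
--         )
--         for i in range(dish_size)
--     )) + '\n'
-- ===== SOURCE B (Python) =====
-- def cubes_n_rollers_string(cubes, rollers, dish_size):
--     grid = [['.'] * dish_size for _ in range(dish_size)]
--     for (i, j) in rollers:
--         if 0 <= i < dish_size and 0 <= j < dish_size: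
--             grid[i][j] = 'O'
--     for (i, j) in cubes:
--         if 0 <= i < dish_size and 0 <= j < dish_size:
--             grid[i][j] = '#'
--     return '\n'.join(''.join(row) for row in grid) + '\n'
-- ===== Notes on version B (the rewrite author's own statement) =====
-- stated objective: alternative
-- what changed: Instead of testing every (i,j) cell for membership in the cubes/rollers lists, B allocates an n x n grid of '.', writes 'O' at each in-bounds roller and then '#' at each in-bounds cube, and joins the rows.
import Mathlib
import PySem

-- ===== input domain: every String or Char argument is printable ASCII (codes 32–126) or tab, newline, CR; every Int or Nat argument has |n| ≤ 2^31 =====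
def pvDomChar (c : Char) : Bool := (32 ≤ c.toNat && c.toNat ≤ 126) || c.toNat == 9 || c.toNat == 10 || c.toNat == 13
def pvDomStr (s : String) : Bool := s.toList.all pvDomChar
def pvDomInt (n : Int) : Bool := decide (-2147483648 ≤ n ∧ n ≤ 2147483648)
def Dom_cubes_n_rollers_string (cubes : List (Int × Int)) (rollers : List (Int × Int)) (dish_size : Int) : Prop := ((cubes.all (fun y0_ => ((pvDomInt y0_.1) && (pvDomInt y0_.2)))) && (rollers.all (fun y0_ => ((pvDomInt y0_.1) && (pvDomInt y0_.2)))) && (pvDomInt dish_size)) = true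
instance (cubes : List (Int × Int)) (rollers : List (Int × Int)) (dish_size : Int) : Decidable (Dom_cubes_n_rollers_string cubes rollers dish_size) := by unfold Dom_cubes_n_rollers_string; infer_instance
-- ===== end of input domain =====

-- B replaces A's per-cell membership tests with one mutable grid: write rollers, then cubes, then join the rows.

-- ===== PORT A =====
def cubes_n_rollers_string (cubes : List (Int × Int)) (rollers : List (Int × Int)) (dish_size : Int) : String :=
  PySem.Str.join "\n" ((PySem.List.pyRange 0 dish_size 1).map (fun i =>
    String.mk ((PySem.List.pyRange 0 dish_size 1).map (fun j =>
      if (i, j) ∈ cubes then '#' else if (i, j) ∈ rollers then 'O' else '.')))) ++ "\n"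

-- ===== PORT B =====
-- one guarded write `grid[i][j] = c` of Source B
def pvWrite (n : Int) (c : Char) (g : List (List Char)) (p : Int × Int) : List (List Char) :=
  if 0 ≤ p.1 ∧ p.1 < n ∧ 0 ≤ p.2 ∧ p.2 < n then
    g.set p.1.toNat ((g.getD p.1.toNat []).set p.2.toNat c)
  else g

def cubes_n_rollers_string_alt (cubes : List (Int × Int)) (rollers : List (Int × Int)) (dish_size : Int) : String :=
  let g0 := List.replicate dish_size.toNat (List.replicate dish_size.toNat '.')
  let g1 := rollers.foldl (pvWrite dish_size 'O') g0
  let g2 := cubes.foldl (pvWrite dish_size '#') g1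
  PySem.Str.join "\n" (g2.map String.mk) ++ "\n"

-- ===== PRECONDITION & SPEC =====
def Spec_cubes_n_rollers_string (cubes : List (Int × Int)) (rollers : List (Int × Int)) (dish_size : Int) (out : String) : Prop := out = cubes_n_rollers_string_alt cubes rollers dish_size
instance (cubes : List (Int × Int)) (rollers : List (Int × Int)) (dish_size : Int) (out : String) : Decidable (Spec_cubes_n_rollers_string cubes rollers dish_size out) := by unfold Spec_cubes_n_rollers_string; infer_instance

-- ===== CLAIM (what is proved, stated in full; the proofs are below) =====
def Claim_equal_cubes_n_rollers_string : Prop := ∀ (cubes : List (Int × Int)) (rollers : List (Int × Int)) (dish_size : Int), Dom_cubes_n_rollers_string cubes rollers dish_size → Spec_cubes_n_rollers_string cubes rollers dish_size (cubes_n_rollers_string cubes rollers dish_size)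

-- ===== LEMMAS AND PROOFS =====

def pvCell (g : List (List Char)) (i j : Nat) : Char := (g.getD i []).getD j ' '

lemma pvWrite_shape (d : Int) (c : Char) (g : List (List Char)) (p : Int × Int)
    (hlen : g.length = d.toNat) (hrow : ∀ r ∈ g, r.length = d.toNat) :
    (pvWrite d c g p).length = d.toNat ∧ ∀ r ∈ pvWrite d c g p, r.length = d.toNat := by
  unfold pvWrite
  split_ifs with h
  · refine ⟨by simpa using hlen, ?_⟩
    intro r hr
    rcases List.mem_or_eq_of_mem_set hr with h1 | h1
    · exact hrow r h1
    · subst h1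
      by_cases hi : p.1.toNat < g.length
      · simp [List.getElem?_eq_getElem hi, hrow _ (List.getElem_mem hi)]
      · simp at *
        omega
  · exact ⟨hlen, hrow⟩

lemma pvWrite_cell (d : Int) (c : Char) (g : List (List Char)) (p : Int × Int) (i j : Nat)
    (hi : i < d.toNat) (hj : j < d.toNat)
    (hlen : g.length = d.toNat) (hrow : ∀ r ∈ g, r.length = d.toNat) :
    pvCell (pvWrite d c g p) i j = if p = ((i : Int), (j : Int)) then c else pvCell g i j := by
  have hig : i < g.length := by omega
  have hjr : j < (g[i]).length := by rw [hrow _ (List.getElem_mem hig)]; exact hj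
  have hgd : g.getD i [] = g[i] := List.getD_eq_getElem g [] hig
  unfold pvWrite pvCell
  by_cases hp : p = ((i : Int), (j : Int))
  · subst hp
    have hguard : (0 ≤ (i : Int) ∧ (i : Int) < d ∧ 0 ≤ (j : Int) ∧ (j : Int) < d) := by
      refine ⟨Int.natCast_nonneg i, by omega, Int.natCast_nonneg j, by omega⟩
    rw [if_pos hguard]
    simp only [Int.toNat_natCast]
    have e1 : (g.set i ((g.getD i []).set j c)).getD i [] = (g.getD i []).set j c := by
      rw [List.getD_eq_getElem _ _ (by simpa using hig)]
      exact List.getElem_set_self (by simpa using hig)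
    rw [e1, hgd, List.getD_eq_getElem _ _ (by simpa using hjr)]
    exact List.getElem_set_self (by simpa using hjr)
  · rw [if_neg hp]
    split_ifs with hguard
    · obtain ⟨ha0, had, hb0, hbd⟩ := hguard
      by_cases hia : p.1.toNat = i
      · have hjb : p.2.toNat ≠ j := by
          intro hjb; apply hp
          have : p = (p.1, p.2) := rfl
          rw [this]; congr 1 <;> omega
        rw [hia]
        have e1 : (g.set i ((g.getD i []).set p.2.toNat c)).getD i []
            = (g.getD i []).set p.2.toNat c := by
          rw [List.getD_eq_getElem _ _ (by simpa using hig)]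
          exact List.getElem_set_self (by simpa using hig)
        rw [e1, hgd]
        have e2 : (g[i].set p.2.toNat c).getD j ' ' = g[i].getD j ' ' := by
          rw [List.getD_eq_getElem _ _ (by simpa using hjr),
              List.getD_eq_getElem _ _ hjr]
          exact List.getElem_set_ne hjb (by simpa using hjr)
        rw [e2]
      · have e1 : (g.set p.1.toNat ((g.getD p.1.toNat []).set p.2.toNat c)).getD i []
            = g.getD i [] := by
          rw [List.getD_eq_getElem _ _ (by simpa using hig),
              List.getElem_set_ne hia, List.getD_eq_getElem _ _ hig]
        rw [e1]
    · rfl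

lemma pvFold_grid (d : Int) (c : Char) (ps : List (Int × Int)) :
    ∀ (g : List (List Char)), g.length = d.toNat → (∀ r ∈ g, r.length = d.toNat) →
    (ps.foldl (pvWrite d c) g).length = d.toNat ∧
    (∀ r ∈ ps.foldl (pvWrite d c) g, r.length = d.toNat) ∧
    (∀ i j : Nat, i < d.toNat → j < d.toNat →
      pvCell (ps.foldl (pvWrite d c) g) i j =
        if ((i : Int), (j : Int)) ∈ ps then c else pvCell g i j) := by
  induction ps with
  | nil => intro g h1 h2; exact ⟨h1, h2, by simp⟩
  | cons p ps ih =>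
    intro g h1 h2
    obtain ⟨w1, w2⟩ := pvWrite_shape d c g p h1 h2
    obtain ⟨r1, r2, r3⟩ := ih (pvWrite d c g p) w1 w2
    refine ⟨by simpa using r1, by simpa using r2, ?_⟩
    intro i j hi hj
    simp only [List.foldl_cons]
    rw [r3 i j hi hj, pvWrite_cell d c g p i j hi hj h1 h2]
    by_cases hmem : ((i : Int), (j : Int)) ∈ ps <;>
      by_cases hp : p = ((i : Int), (j : Int)) <;>
      simp [hmem, hp, List.mem_cons, eq_comm]

-- ===== VERDICT (by name: the statement is the Claim_ definition above) =====
theorem cubes_n_rollers_string_spec : Claim_equal_cubes_n_rollers_string := by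
  intro cubes rollers d _
  unfold Spec_cubes_n_rollers_string cubes_n_rollers_string cubes_n_rollers_string_alt
  dsimp only
  have h0len : (List.replicate d.toNat (List.replicate d.toNat '.')).length = d.toNat := by simp
  have h0row : ∀ r ∈ List.replicate d.toNat (List.replicate d.toNat '.'), r.length = d.toNat := by
    intro r hr
    rw [(List.eq_of_mem_replicate hr : r = List.replicate d.toNat '.')]; simp
  obtain ⟨h1len, h1row, h1cell⟩ := pvFold_grid d 'O' rollers _ h0len h0row
  obtain ⟨h2len, h2row, h2cell⟩ := pvFold_grid d '#' cubes _ h1len h1row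
  congr 1
  apply congrArg
  apply List.ext_getElem
  · simpa [PySem.List.length_pyRange_one] using h2len.symm
  · intro i hiL hiR
    have hi : i < d.toNat := by
      simpa [PySem.List.length_pyRange_one] using hiL
    have hig : i < (cubes.foldl (pvWrite d '#')
        (rollers.foldl (pvWrite d 'O')
          (List.replicate d.toNat (List.replicate d.toNat '.')))).length := by omega
    simp only [List.getElem_map, PySem.List.getElem_pyRange_one, zero_add]
    apply congrArg String.mk
    apply List.ext_getElem
    · simpa [PySem.List.length_pyRange_one] using (h2row _ (List.getElem_mem hig)).symm
    · intro j hjL hjR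
      have hj : j < d.toNat := by
        simpa [PySem.List.length_pyRange_one] using hjL
      have hjg : j < ((cubes.foldl (pvWrite d '#')
          (rollers.foldl (pvWrite d 'O')
            (List.replicate d.toNat (List.replicate d.toNat '.'))))[i]).length := by
        rw [h2row _ (List.getElem_mem hig)]; exact hj
      have hcell : pvCell (cubes.foldl (pvWrite d '#')
          (rollers.foldl (pvWrite d 'O')
            (List.replicate d.toNat (List.replicate d.toNat '.')))) i j =
          (cubes.foldl (pvWrite d '#')
            (rollers.foldl (pvWrite d 'O')
              (List.replicate d.toNat (List.replicate d.toNat '.'))))[i][j] := by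
        unfold pvCell
        rw [List.getD_eq_getElem _ _ hig, List.getD_eq_getElem _ _ hjg]
      have h0cell : pvCell (List.replicate d.toNat (List.replicate d.toNat '.')) i j = '.' := by
        unfold pvCell
        have e1 : (List.replicate d.toNat (List.replicate d.toNat '.')).getD i []
            = List.replicate d.toNat '.' := by
          rw [List.getD_eq_getElem _ _ (by simpa using hi)]; simp
        rw [e1, List.getD_eq_getElem _ _ (by simpa using hj)]; simp
      simp only [List.getElem_map, PySem.List.getElem_pyRange_one, zero_add]
      rw [← hcell, h2cell i j hi hj, h1cell i j hi hj, h0cell]
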